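-- pv_equiv track=rewrite | github.com/mauricio-zamora-ucr/preeii2 | src/domain/entities/expediente.py | _convertir_sigla_normalizada
-- ===== SOURCE A (Python) =====
-- def _convertir_sigla_normalizada(sigla: str) -> str:
--     """Convierte una sigla a su forma normalizada según las reglas de la UCR."""
--     sigla_normalizada = sigla
--
--     conversiones = {
--         'EF': 'EF-D',
--         'RP': 'RP-1',
--         'EG03': 'EG-CA',
--         'EG0124': 'EG-I',
--         'EG0126': 'EG-I',
--         'EG0125': 'EG-II',
--         'EG0127': 'EG-II',
--         'SR0001': 'SR-I',
--         'SR0002': 'SR-I',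
--         'SR0003': 'SR-I',
--         'SR0004': 'SR-I',
--         'SR0005': 'SR-I',
--         'SR0006': 'SR-I',
--         'SR0007': 'SR-I',
--         'SR0008': 'SR-I',
--         'SR0010': 'SR-I',
--         'SR0011': 'SR-II',
--         'SR0022': 'SR-II',
--         'SR0033': 'SR-II',
--         'SR0044': 'SR-II',
--         'SR0055': 'SR-II',
--         'SR0066': 'SR-II',
--         'SR0077': 'SR-II',
--         'SR0088': 'SR-II',
--         'SR0110': 'SR-II',
--     }
--
--     for prefijo, normalizada in conversiones.items():
--         if sigla.startswith(prefijo):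
--             sigla_normalizada = normalizada
--             break
--
--     return sigla_normalizada
-- ===== SOURCE B (Python) =====
-- # Decision-tree re-implementation: instead of scanning a 25-entry prefix table,
-- # branch on the two-letter family and then on the digit characters, exploiting
-- # the regular structure of the codes (EG01[24|25|26|27], SR00dd with repeated or
-- # small digits, SR0110); no table is consulted at all.
--
--
-- def _convertir_sigla_normalizada(sigla: str) -> str:
--     """Convierte una sigla a su forma normalizada según las reglas de la UCR."""
--     head = sigla[:2]
--     if head == 'EF':
--         return 'EF-D'
--     if head == 'RP':
--         return 'RP-1'
--     if head == 'EG':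
--         if sigla[2:4] == '03':
--             return 'EG-CA'
--         if sigla[2:5] == '012':
--             q = sigla[5:6]
--             if q in ('4', '6'):
--                 return 'EG-I'
--             if q in ('5', '7'):
--                 return 'EG-II'
--         return sigla
--     if head == 'SR':
--         c, d = sigla[4:5], sigla[5:6]
--         nonzero = ('1', '2', '3', '4', '5', '6', '7', '8')
--         if sigla[2:4] == '00':
--             if (c == '0' and d in nonzero) or (c == '1' and d == '0'):
--                 return 'SR-I'
--             if c == d and c in nonzero:
--                 return 'SR-II'
--         elif sigla[2:4] == '01' and c == '1' and d == '0':
--             return 'SR-II'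
--     return sigla
-- ===== Notes on version B (the rewrite author's own statement) =====
-- stated objective: alternative
-- what changed: Replaces the insertion-order scan over a 25-entry prefix table with a table-free character-level decision tree: branch on the two-letter family (EF/RP/EG/SR) and then on the digit characters, exploiting the regular structure of the codes (EG01[2457], SR00 with repeated or small digits, SR0110); correct because the table's prefixes are mutually non-overlapping.
import Mathlib
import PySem

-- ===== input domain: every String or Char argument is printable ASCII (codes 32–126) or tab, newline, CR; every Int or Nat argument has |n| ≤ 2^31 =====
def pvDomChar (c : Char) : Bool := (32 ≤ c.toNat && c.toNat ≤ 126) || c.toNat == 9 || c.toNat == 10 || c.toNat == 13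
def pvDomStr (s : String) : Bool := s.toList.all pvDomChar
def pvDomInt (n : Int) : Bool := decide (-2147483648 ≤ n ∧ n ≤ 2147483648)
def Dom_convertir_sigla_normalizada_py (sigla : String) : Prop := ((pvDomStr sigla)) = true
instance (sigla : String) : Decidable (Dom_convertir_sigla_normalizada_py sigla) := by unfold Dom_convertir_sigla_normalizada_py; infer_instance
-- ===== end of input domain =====

-- B replaces A's scan over a 25-entry prefix table by a character-level decision
-- tree on the code's family letters and digits (objective: alternative algorithm,
-- no table at all); correct because the codes follow a regular pattern.

-- ===== PORT A =====
def pvConvA : List (String × String) :=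
  [("EF", "EF-D"), ("RP", "RP-1"), ("EG03", "EG-CA"),
   ("EG0124", "EG-I"), ("EG0126", "EG-I"), ("EG0125", "EG-II"), ("EG0127", "EG-II"),
   ("SR0001", "SR-I"), ("SR0002", "SR-I"), ("SR0003", "SR-I"), ("SR0004", "SR-I"),
   ("SR0005", "SR-I"), ("SR0006", "SR-I"), ("SR0007", "SR-I"), ("SR0008", "SR-I"),
   ("SR0010", "SR-I"),
   ("SR0011", "SR-II"), ("SR0022", "SR-II"), ("SR0033", "SR-II"), ("SR0044", "SR-II"),
   ("SR0055", "SR-II"), ("SR0066", "SR-II"), ("SR0077", "SR-II"), ("SR0088", "SR-II"),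
   ("SR0110", "SR-II")]

-- the for-loop with break: first matching prefix wins, else the initial value sigla
def pvConvALoop (sigla : String) : List (String × String) → String
  | [] => sigla
  | (prefijo, normalizada) :: rest =>
      if PySem.Str.startswith sigla prefijo then normalizada else pvConvALoop sigla rest

def convertir_sigla_normalizada_py (sigla : String) : String :=
  pvConvALoop sigla pvConvA

-- ===== PORT B =====
def convertir_sigla_normalizada_py_alt (sigla : String) : String :=
  let head := PySem.Str.slice sigla none (some 2)
  if head = "EF" then "EF-D"
  else if head = "RP" then "RP-1"
  else if head = "EG" then
    if PySem.Str.slice sigla (some 2) (some 4) = "03" then "EG-CA"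
    else if PySem.Str.slice sigla (some 2) (some 5) = "012" then
      let q := PySem.Str.slice sigla (some 5) (some 6)
      if q = "4" ∨ q = "6" then "EG-I"
      else if q = "5" ∨ q = "7" then "EG-II"
      else sigla
    else sigla
  else if head = "SR" then
    let c := PySem.Str.slice sigla (some 4) (some 5)
    let d := PySem.Str.slice sigla (some 5) (some 6)
    let nonzero : List String := ["1", "2", "3", "4", "5", "6", "7", "8"]
    if PySem.Str.slice sigla (some 2) (some 4) = "00" then
      if (c = "0" ∧ d ∈ nonzero) ∨ (c = "1" ∧ d = "0") then "SR-I"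
      else if c = d ∧ c ∈ nonzero then "SR-II"
      else sigla
    else if PySem.Str.slice sigla (some 2) (some 4) = "01" ∧ c = "1" ∧ d = "0" then "SR-II"
    else sigla
  else sigla

-- ===== PRECONDITION & SPEC =====
def Spec_convertir_sigla_normalizada_py (sigla : String) (out : String) : Prop := out = convertir_sigla_normalizada_py_alt sigla
instance (sigla : String) (out : String) : Decidable (Spec_convertir_sigla_normalizada_py sigla out) := by unfold Spec_convertir_sigla_normalizada_py; infer_instance

-- ===== CLAIM (what is proved, stated in full; the proofs are below) =====
def Claim_equal_convertir_sigla_normalizada_py : Prop := ∀ (sigla : String), Dom_convertir_sigla_normalizada_py sigla → Spec_convertir_sigla_normalizada_py sigla (convertir_sigla_normalizada_py sigla)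

-- ===== LEMMAS AND PROOFS =====

-- the char-level decision chain both ports are proved equal to (proof-side only):
-- `some v` = the normalized form, `none` = the code is left unchanged
def pvSpec (l : List Char) : Option String :=
  if l.take 2 = ['E', 'F'] then some "EF-D"
  else if l.take 2 = ['R', 'P'] then some "RP-1"
  else if l.take 2 = ['E', 'G'] then
    if (l.drop 2).take 2 = ['0', '3'] then some "EG-CA"
    else if (l.drop 2).take 3 = ['0', '1', '2'] then
      if (l.drop 5).take 1 = ['4'] ∨ (l.drop 5).take 1 = ['6'] then some "EG-I"
      else if (l.drop 5).take 1 = ['5'] ∨ (l.drop 5).take 1 = ['7'] then some "EG-II"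
      else none
    else none
  else if l.take 2 = ['S', 'R'] then
    if (l.drop 2).take 2 = ['0', '0'] then
      if (l.drop 4).take 1 = ['0'] ∧
            ((l.drop 5).take 1 = ['1'] ∨ (l.drop 5).take 1 = ['2'] ∨
              (l.drop 5).take 1 = ['3'] ∨ (l.drop 5).take 1 = ['4'] ∨
                (l.drop 5).take 1 = ['5'] ∨ (l.drop 5).take 1 = ['6'] ∨
                  (l.drop 5).take 1 = ['7'] ∨ (l.drop 5).take 1 = ['8']) ∨
          (l.drop 4).take 1 = ['1'] ∧ (l.drop 5).take 1 = ['0'] then some "SR-I"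
      else if (l.drop 4).take 1 = (l.drop 5).take 1 ∧
            ((l.drop 4).take 1 = ['1'] ∨ (l.drop 4).take 1 = ['2'] ∨
              (l.drop 4).take 1 = ['3'] ∨ (l.drop 4).take 1 = ['4'] ∨
                (l.drop 4).take 1 = ['5'] ∨ (l.drop 4).take 1 = ['6'] ∨
                  (l.drop 4).take 1 = ['7'] ∨ (l.drop 4).take 1 = ['8']) then some "SR-II"
      else none
    else if (l.drop 2).take 2 = ['0', '1'] ∧ (l.drop 4).take 1 = ['1'] ∧
        (l.drop 5).take 1 = ['0'] then some "SR-II"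
    else none
  else none

-- startswith is list-level prefix testing
theorem pv_startswith_eq (s p : String) :
    PySem.Str.startswith s p = p.toList.isPrefixOf s.toList := by
  rw [Bool.eq_iff_iff]
  simp [PySem.Str.startswith_eq, PySem.Chars.startswith_iff, List.isPrefixOf_iff_prefix]

-- a slice with literal nonnegative bounds is drop-then-take on the char list
theorem pv_slice_eq (s : String) (a b : Int) (t : String) (ha : 0 ≤ a) (hb : 0 ≤ b) :
    (PySem.Str.slice s (some a) (some b) = t) ↔
      ((s.toList.drop a.toNat).take (b.toNat - a.toNat) = t.toList) := by
  rw [← String.toList_inj, PySem.Str.toList_slice, PySem.Chars.slice_eq_listSlice,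
    PySem.List.slice_toNat (ha := ha) (hb := hb)]

theorem pv_slice0_eq (s : String) (b : Int) (t : String) (hb : 0 ≤ b) :
    (PySem.Str.slice s none (some b) = t) ↔ (s.toList.take b.toNat = t.toList) := by
  rw [← String.toList_inj, PySem.Str.toList_slice, PySem.Chars.slice_eq_listSlice,
    PySem.List.slice_to (hb := hb)]

-- the chars of the one-character slice s[5:6]
theorem pv_slice56_toList (s : String) :
    (PySem.Str.slice s (some 5) (some 6)).toList = (s.toList.drop 5).take 1 := by
  rw [PySem.Str.toList_slice, PySem.Chars.slice_eq_listSlice,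
    PySem.List.slice_toNat (ha := by norm_num) (hb := by norm_num)]
  simp

set_option maxHeartbeats 2000000 in
theorem pv_A_char (sigla : String) :
    convertir_sigla_normalizada_py sigla = (pvSpec sigla.toList).getD sigla := by
  unfold convertir_sigla_normalizada_py pvConvA
  simp only [pvConvALoop, pv_startswith_eq, String.reduceToList]
  generalize sigla.toList = l
  rcases l with _ | ⟨c1, _ | ⟨c2, _ | ⟨c3, _ | ⟨c4, _ | ⟨c5, _ | ⟨c6, t⟩⟩⟩⟩⟩⟩
  · simp [pvSpec, List.isPrefixOf]
  · simp [pvSpec, List.isPrefixOf]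
  · by_cases e1 : c1 = 'E'
    · subst e1
      by_cases e2 : c2 = 'F'
      · subst e2; simp [pvSpec, List.isPrefixOf]
      · simp [pvSpec, List.isPrefixOf, e2, Ne.symm e2]
    · by_cases r1 : c1 = 'R'
      · subst r1
        by_cases r2 : c2 = 'P'
        · subst r2; simp [pvSpec, List.isPrefixOf]
        · simp [pvSpec, List.isPrefixOf, r2, Ne.symm r2]
      · simp [pvSpec, List.isPrefixOf, e1, r1, Ne.symm e1, Ne.symm r1]
  · by_cases e1 : c1 = 'E'
    · subst e1
      by_cases e2 : c2 = 'F'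
      · subst e2; simp [pvSpec, List.isPrefixOf]
      · simp [pvSpec, List.isPrefixOf, e2, Ne.symm e2]
    · by_cases r1 : c1 = 'R'
      · subst r1
        by_cases r2 : c2 = 'P'
        · subst r2; simp [pvSpec, List.isPrefixOf]
        · simp [pvSpec, List.isPrefixOf, r2, Ne.symm r2]
      · simp [pvSpec, List.isPrefixOf, e1, r1, Ne.symm e1, Ne.symm r1]
  · by_cases e1 : c1 = 'E'
    · subst e1
      by_cases e2 : c2 = 'F'
      · subst e2; simp [pvSpec, List.isPrefixOf]
      · by_cases e3 : c2 = 'G'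
        · subst e3
          by_cases g1 : c3 = '0'
          · subst g1
            by_cases g2 : c4 = '3'
            · subst g2; simp [pvSpec, List.isPrefixOf]
            · simp [pvSpec, List.isPrefixOf, g2, Ne.symm g2]
          · simp [pvSpec, List.isPrefixOf, g1, Ne.symm g1]
        · simp [pvSpec, List.isPrefixOf, e2, e3, Ne.symm e2, Ne.symm e3]
    · by_cases r1 : c1 = 'R'
      · subst r1
        by_cases r2 : c2 = 'P'
        · subst r2; simp [pvSpec, List.isPrefixOf]
        · simp [pvSpec, List.isPrefixOf, r2, Ne.symm r2]
      · simp [pvSpec, List.isPrefixOf, e1, r1, Ne.symm e1, Ne.symm r1]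
  · by_cases e1 : c1 = 'E'
    · subst e1
      by_cases e2 : c2 = 'F'
      · subst e2; simp [pvSpec, List.isPrefixOf]
      · by_cases e3 : c2 = 'G'
        · subst e3
          by_cases g1 : c3 = '0'
          · subst g1
            by_cases g2 : c4 = '3'
            · subst g2; simp [pvSpec, List.isPrefixOf]
            · simp [pvSpec, List.isPrefixOf, g2, Ne.symm g2]
          · simp [pvSpec, List.isPrefixOf, g1, Ne.symm g1]
        · simp [pvSpec, List.isPrefixOf, e2, e3, Ne.symm e2, Ne.symm e3]
    · by_cases r1 : c1 = 'R'
      · subst r1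
        by_cases r2 : c2 = 'P'
        · subst r2; simp [pvSpec, List.isPrefixOf]
        · simp [pvSpec, List.isPrefixOf, r2, Ne.symm r2]
      · simp [pvSpec, List.isPrefixOf, e1, r1, Ne.symm e1, Ne.symm r1]
  · by_cases e1 : c1 = 'E'
    · subst e1
      by_cases e2 : c2 = 'F'
      · subst e2; simp [pvSpec, List.isPrefixOf]
      · by_cases e3 : c2 = 'G'
        · subst e3
          by_cases g1 : c3 = '0'
          · subst g1
            by_cases g2 : c4 = '3'
            · subst g2; simp [pvSpec, List.isPrefixOf]
            · by_cases g3 : c4 = '1'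
              · subst g3
                by_cases g4 : c5 = '2'
                · subst g4
                  by_cases q1 : c6 = '4'
                  · subst q1; simp [pvSpec, List.isPrefixOf]
                  · by_cases q2 : c6 = '6'
                    · subst q2; simp [pvSpec, List.isPrefixOf]
                    · by_cases q3 : c6 = '5'
                      · subst q3; simp [pvSpec, List.isPrefixOf]
                      · by_cases q4 : c6 = '7'
                        · subst q4; simp [pvSpec, List.isPrefixOf]
                        · simp [pvSpec, List.isPrefixOf, q1, q2, q3, q4,
                            Ne.symm q1, Ne.symm q2, Ne.symm q3, Ne.symm q4]
                · simp [pvSpec, List.isPrefixOf, g4, Ne.symm g4]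
              · simp [pvSpec, List.isPrefixOf, g2, g3, Ne.symm g2, Ne.symm g3]
          · simp [pvSpec, List.isPrefixOf, g1, Ne.symm g1]
        · simp [pvSpec, List.isPrefixOf, e2, e3, Ne.symm e2, Ne.symm e3]
    · by_cases r1 : c1 = 'R'
      · subst r1
        by_cases r2 : c2 = 'P'
        · subst r2; simp [pvSpec, List.isPrefixOf]
        · simp [pvSpec, List.isPrefixOf, r2, Ne.symm r2]
      · by_cases s1 : c1 = 'S'
        · subst s1
          by_cases s2 : c2 = 'R'
          · subst s2
            by_cases t1 : c3 = '0'
            · subst t1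
              by_cases t2 : c4 = '0'
              · subst t2
                by_cases u0 : c5 = '0'
                · subst u0
                  by_cases v : c6 = '1' ∨ c6 = '2' ∨ c6 = '3' ∨ c6 = '4' ∨ c6 = '5' ∨
                      c6 = '6' ∨ c6 = '7' ∨ c6 = '8'
                  · rcases v with rfl | rfl | rfl | rfl | rfl | rfl | rfl | rfl <;>
                      simp [pvSpec, List.isPrefixOf]
                  · push Not at v
                    obtain ⟨v1, v2, v3, v4, v5, v6, v7, v8⟩ := v
                    simp [pvSpec, List.isPrefixOf, v1, v2, v3, v4, v5, v6, v7, v8,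
                      Ne.symm v1, Ne.symm v2, Ne.symm v3, Ne.symm v4, Ne.symm v5,
                      Ne.symm v6, Ne.symm v7, Ne.symm v8]
                · by_cases u1 : c5 = '1'
                  · subst u1
                    by_cases w : c6 = '0'
                    · subst w; simp [pvSpec, List.isPrefixOf]
                    · by_cases w1 : c6 = '1'
                      · subst w1; simp [pvSpec, List.isPrefixOf]
                      · simp [pvSpec, List.isPrefixOf, w, w1, Ne.symm w, Ne.symm w1]
                  · by_cases v2 : c5 = c6
                    · subst v2
                      by_cases m : c5 = '2' ∨ c5 = '3' ∨ c5 = '4' ∨ c5 = '5' ∨ c5 = '6' ∨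
                          c5 = '7' ∨ c5 = '8'
                      · rcases m with rfl | rfl | rfl | rfl | rfl | rfl | rfl <;>
                          simp [pvSpec, List.isPrefixOf]
                      · push Not at m
                        obtain ⟨m2, m3, m4, m5, m6, m7, m8⟩ := m
                        simp [pvSpec, List.isPrefixOf, u0, u1, m2, m3, m4, m5, m6, m7, m8,
                          Ne.symm u0, Ne.symm u1, Ne.symm m2, Ne.symm m3, Ne.symm m4,
                          Ne.symm m5, Ne.symm m6, Ne.symm m7, Ne.symm m8]
                    · by_cases m : c5 = '2' ∨ c5 = '3' ∨ c5 = '4' ∨ c5 = '5' ∨ c5 = '6' ∨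
                          c5 = '7' ∨ c5 = '8'
                      · rcases m with rfl | rfl | rfl | rfl | rfl | rfl | rfl <;>
                          simp [pvSpec, List.isPrefixOf, v2, Ne.symm v2]
                      · push Not at m
                        obtain ⟨m2, m3, m4, m5, m6, m7, m8⟩ := m
                        simp [pvSpec, List.isPrefixOf, u0, u1, m2, m3, m4, m5, m6, m7, m8,
                          Ne.symm u0, Ne.symm u1, Ne.symm m2, Ne.symm m3, Ne.symm m4,
                          Ne.symm m5, Ne.symm m6, Ne.symm m7, Ne.symm m8]
              · by_cases t3 : c4 = '1'
                · subst t3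
                  by_cases x1 : c5 = '1'
                  · subst x1
                    by_cases x2 : c6 = '0'
                    · subst x2; simp [pvSpec, List.isPrefixOf]
                    · simp [pvSpec, List.isPrefixOf, x2, Ne.symm x2]
                  · simp [pvSpec, List.isPrefixOf, x1, Ne.symm x1]
                · simp [pvSpec, List.isPrefixOf, t2, t3, Ne.symm t2, Ne.symm t3]
            · simp [pvSpec, List.isPrefixOf, t1, Ne.symm t1]
          · simp [pvSpec, List.isPrefixOf, s2, Ne.symm s2]
        · simp [pvSpec, List.isPrefixOf, e1, r1, s1, Ne.symm e1, Ne.symm r1, Ne.symm s1]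

set_option maxHeartbeats 1000000 in
theorem pv_B_char (sigla : String) :
    convertir_sigla_normalizada_py_alt sigla = (pvSpec sigla.toList).getD sigla := by
  unfold convertir_sigla_normalizada_py_alt
  simp only [List.mem_cons, List.not_mem_nil, or_false,
    pv_slice0_eq sigla 2 (hb := by norm_num),
    pv_slice_eq sigla 2 4 (ha := by norm_num) (hb := by norm_num),
    pv_slice_eq sigla 2 5 (ha := by norm_num) (hb := by norm_num),
    pv_slice_eq sigla 4 5 (ha := by norm_num) (hb := by norm_num),
    pv_slice_eq sigla 5 6 (ha := by norm_num) (hb := by norm_num),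
    pv_slice56_toList sigla, Int.reduceToNat, Nat.reduceSub, String.reduceToList]
  simp only [pvSpec]
  split_ifs <;> rfl

-- ===== VERDICT (by name: the statement is the Claim_ definition above) =====
theorem convertir_sigla_normalizada_py_spec : Claim_equal_convertir_sigla_normalizada_py := by
  intro sigla _
  unfold Spec_convertir_sigla_normalizada_py
  rw [pv_A_char, pv_B_char]
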